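-- pv_equiv track=rewrite | github.com/ematavfr/medium-datligent | test_tag_extraction.py | extract_tags_logic
-- ===== SOURCE A (Python) =====
-- def extract_tags_logic(title, tags=None):
--     if tags is None:
--         tags = []
--
--     # Fallback: Extract generic keywords from title if no tags found
--     if not tags:
--         common_words = {"the", "a", "an", "in", "on", "at", "for", "to", "of", "and", "or", "with", "by", "is", "are", "was", "were", "be", "been", "how", "what", "why", "when", "where", "who", "which", "vs", "versus", "compare", "comparison", "guide", "tutorial", "best", "top", "review", "introduction", "intro", "everything", "need", "know", "about", "using", "your", "more", "most", "some", "any"}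
--         # Replace common punctuation with space to split correctly
--         clean_title = title.replace(":", " ").replace("-", " ").replace("(", " ").replace(")", " ").replace(",", " ").replace(".", " ").replace("?", " ").replace("!", " ")
--         words = clean_title.split()
--
--         # Generic technical terms to prioritize
--         tech_keywords = {"python", "java", "javascript", "react", "vue", "angular", "node", "express", "fastapi", "django", "flask", "ai", "ml", "llm", "gpt", "deep", "learning", "data", "science", "docker", "kubernetes", "cloud", "aws", "azure", "gcp", "sql", "postgresql", "mongodb", "redis", "devops", "security", "web", "mobile", "ios", "android", "startup", "business", "tech"}
--
--         extracted = []
--         for w in words: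
--             w_lower = w.lower()
--             if w_lower in tech_keywords:
--                 extracted.append(w if w_lower in ["ai", "ml", "llm", "gpt", "aws", "gcp", "ios", "sql"] else w.capitalize())
--             elif w_lower not in common_words and len(w) > 4:
--                 extracted.append(w.capitalize())
--
--         # Deduplicate while preserving order and limit to 3 tags
--         tags = []
--         for t in extracted:
--             if t not in tags:
--                 tags.append(t)
--         tags = tags[:3]
--
--     if not tags:
--         tags = ["Tech"]
--     return tags
-- ===== SOURCE B (Python) =====
-- # Recursive one-pass re-implementation: translate-table cleaning, flat
-- # eligibility/casing rules, recursion accumulating at most 3 unique tags.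
-- _COMMON = {"the", "a", "an", "in", "on", "at", "for", "to", "of", "and", "or", "with", "by", "is", "are", "was", "were", "be", "been", "how", "what", "why", "when", "where", "who", "which", "vs", "versus", "compare", "comparison", "guide", "tutorial", "best", "top", "review", "introduction", "intro", "everything", "need", "know", "about", "using", "your", "more", "most", "some", "any"}
-- _TECH = {"python", "java", "javascript", "react", "vue", "angular", "node", "express", "fastapi", "django", "flask", "ai", "ml", "llm", "gpt", "deep", "learning", "data", "science", "docker", "kubernetes", "cloud", "aws", "azure", "gcp", "sql", "postgresql", "mongodb", "redis", "devops", "security", "web", "mobile", "ios", "android", "startup", "business", "tech"}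
-- _ACRONYMS = {"ai", "ml", "llm", "gpt", "aws", "gcp", "ios", "sql"}
-- _TABLE = str.maketrans(":-(),.?!", " " * 8)
--
--
-- def _pick(words, acc):
--     if not words or len(acc) == 3:
--         return acc
--     w = words[0]
--     wl = w.lower()
--     eligible = wl in _TECH or (len(w) > 4 and wl not in _COMMON)
--     tag = w if wl in _ACRONYMS else w.capitalize()
--     if eligible and tag not in acc:
--         acc = acc + [tag]
--     return _pick(words[1:], acc)
--
--
-- def extract_tags_logic(title, tags=None):
--     if tags:
--         return tags
--     picked = _pick(title.translate(_TABLE).split(), [])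
--     return picked if picked else ["Tech"]
-- ===== Notes on version B (the rewrite author's own statement) =====
-- stated objective: alternative
-- what changed: A's staged imperative pipeline (8 chained .replace calls, a loop building a full `extracted` list with a nested if/elif filter, then a separate dedup loop and a final [:3] slice) is replaced by a recursive single pass: the title is cleaned with one str.translate table, each word's eligibility and casing are computed as two flat rules (eligible = tech or long-and-uncommon; tag = verbatim for acronyms else capitalized, valid because the acronym set is a subset of the tech set), and a recursion over the word list accumulates at most 3 unique tags, stopping as soon as 3 are found; …
import Mathlib
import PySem

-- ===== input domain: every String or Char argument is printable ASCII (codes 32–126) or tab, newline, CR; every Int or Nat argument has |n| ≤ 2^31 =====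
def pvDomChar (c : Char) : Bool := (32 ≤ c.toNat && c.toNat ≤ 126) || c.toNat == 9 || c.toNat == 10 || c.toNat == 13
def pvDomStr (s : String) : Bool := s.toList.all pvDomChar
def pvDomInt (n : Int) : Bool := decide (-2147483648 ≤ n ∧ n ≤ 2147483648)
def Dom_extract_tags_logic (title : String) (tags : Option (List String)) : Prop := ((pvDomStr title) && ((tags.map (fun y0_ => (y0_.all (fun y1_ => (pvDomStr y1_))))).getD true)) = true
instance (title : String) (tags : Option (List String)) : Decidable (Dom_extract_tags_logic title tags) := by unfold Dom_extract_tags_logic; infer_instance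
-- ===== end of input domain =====

-- B replaces A's staged pipeline (8 chained replaces, build full `extracted`, dedup, slice)
-- by a translate-table cleaning plus a recursive single pass with flat eligibility/casing
-- rules accumulating at most 3 unique tags; objective: alternative, same result.


-- ===== PORT A =====

-- module-level set literals of both Pythons (set literals of distinct strings;
-- 'x in s' is ported as list membership, identical for a duplicate-free literal)
def pvCommonWords : List String := ["the", "a", "an", "in", "on", "at", "for", "to", "of", "and", "or", "with", "by", "is", "are", "was", "were", "be", "been", "how", "what", "why", "when", "where", "who", "which", "vs", "versus", "compare", "comparison", "guide", "tutorial", "best", "top", "review", "introduction", "intro", "everything", "need", "know", "about", "using", "your", "more", "most", "some", "any"]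

def pvTechKeywords : List String := ["python", "java", "javascript", "react", "vue", "angular", "node", "express", "fastapi", "django", "flask", "ai", "ml", "llm", "gpt", "deep", "learning", "data", "science", "docker", "kubernetes", "cloud", "aws", "azure", "gcp", "sql", "postgresql", "mongodb", "redis", "devops", "security", "web", "mobile", "ios", "android", "startup", "business", "tech"]

def pvAcronyms : List String := ["ai", "ml", "llm", "gpt", "aws", "gcp", "ios", "sql"]

-- w.capitalize(): hand port (PySem has no capitalize); exact on the ASCII domain,
-- where Python's titlecase of the first character coincides with uppercase.
def pvCapitalize (w : String) : String :=
  match w.toList with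
  | [] => ""
  | c :: cs => String.ofList (PySem.Chars.upperChar c :: cs.map PySem.Chars.lowerChar)

def extract_tags_logic (title : String) (tags : Option (List String)) : List String :=
  -- 'if tags is None: tags = []'
  let tags0 : List String := match tags with | none => [] | some t => t
  let tags1 : List String :=
    if tags0.isEmpty then
      -- clean_title: eight chained .replace(…, " ")
      let clean_title :=
        PySem.Str.replace (PySem.Str.replace (PySem.Str.replace (PySem.Str.replace
          (PySem.Str.replace (PySem.Str.replace (PySem.Str.replace (PySem.Str.replace
            title ":" " ") "-" " ") "(" " ") ")" " ") "," " ") "." " ") "?" " ") "!" " "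
      let words := PySem.Str.split₀ clean_title
      -- for w in words: build `extracted`
      let extracted := words.foldl (fun e w =>
        let w_lower := PySem.Str.lower w
        if pvTechKeywords.contains w_lower then
          e ++ [if pvAcronyms.contains w_lower then w else pvCapitalize w]
        else if ¬ pvCommonWords.contains w_lower ∧ PySem.Str.len w > 4 then
          e ++ [pvCapitalize w]
        else e) []
      -- for t in extracted: dedup preserving order
      let tags2 := extracted.foldl (fun t x => if x ∈ t then t else t ++ [x]) []
      -- tags = tags[:3]
      PySem.List.slice tags2 none (some 3)
    else tags0
  -- 'if not tags: tags = ["Tech"]'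
  if tags1.isEmpty then ["Tech"] else tags1

-- ===== PORT B =====

-- the translation table _TABLE = str.maketrans(":-(),.?!", " "*8), as a char map
def pvTranslate (c : Char) : Char :=
  if c ∈ [':', '-', '(', ')', ',', '.', '?', '!'] then ' ' else c

-- _pick of Source B: recursion over the word list accumulating at most 3 unique tags
def pvPick : List String → List String → List String
  | [], acc => acc
  | w :: rest, acc =>
    if acc.length == 3 then acc
    else
      let wl := PySem.Str.lower w
      let eligible := pvTechKeywords.contains wl ||
        (decide (PySem.Str.len w > 4) && !pvCommonWords.contains wl)
      let tag := if pvAcronyms.contains wl then w else pvCapitalize w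
      let acc' := if eligible && !acc.contains tag then acc ++ [tag] else acc
      pvPick rest acc'

def extract_tags_logic_alt (title : String) (tags : Option (List String)) : List String :=
  match tags with
  | some (a :: t) => a :: t   -- 'if tags: return tags'
  | _ =>
    let picked := pvPick (PySem.Str.split₀ (String.ofList (title.toList.map pvTranslate))) []
    if picked.isEmpty then ["Tech"] else picked

-- ===== PRECONDITION & SPEC =====
def Spec_extract_tags_logic (title : String) (tags : Option (List String)) (out : List String) : Prop := out = extract_tags_logic_alt title tags
instance (title : String) (tags : Option (List String)) (out : List String) : Decidable (Spec_extract_tags_logic title tags out) := by unfold Spec_extract_tags_logic; infer_instance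

-- ===== CLAIM (what is proved, stated in full; the proofs are below) =====
def Claim_equal_extract_tags_logic : Prop := ∀ (title : String) (tags : Option (List String)), Dom_extract_tags_logic title tags → Spec_extract_tags_logic title tags (extract_tags_logic title tags)

-- ===== LEMMAS AND PROOFS =====

-- the candidate produced for one word by A's loop body, as an Option (proof-side helper)
def pvCandidate (w : String) : Option String :=
  let wl := PySem.Str.lower w
  if pvTechKeywords.contains wl then
    some (if pvAcronyms.contains wl then w else pvCapitalize w)
  else if ¬ pvCommonWords.contains wl ∧ PySem.Str.len w > 4 then
    some (pvCapitalize w)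
  else none

-- A's collecting loop body is pvCandidate, append-style
lemma stepA_eq_candidate :
    (fun (e : List String) (w : String) =>
      let w_lower := PySem.Str.lower w
      if pvTechKeywords.contains w_lower then
        e ++ [if pvAcronyms.contains w_lower then w else pvCapitalize w]
      else if ¬ pvCommonWords.contains w_lower ∧ PySem.Str.len w > 4 then
        e ++ [pvCapitalize w]
      else e)
    = fun (e : List String) (w : String) =>
        match pvCandidate w with
        | none => e
        | some t => e ++ [t] := by
  funext e w
  simp only [pvCandidate]
  split_ifs <;> rfl

-- a fold that appends each some-candidate is filterMap
lemma foldl_opt_append (f : String → Option String) (ws : List String) (e : List String) :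
    ws.foldl (fun e w => match f w with | none => e | some t => e ++ [t]) e
      = e ++ ws.filterMap f := by
  induction ws generalizing e with
  | nil => simp
  | cons w ws ih =>
    simp only [List.foldl_cons, List.filterMap_cons]
    cases f w <;> simp [ih]

-- the dedup fold only appends: its start is a prefix of its result
lemma dedup_foldl_prefix (ts : List String) (acc : List String) :
    acc <+: ts.foldl (fun t x => if x ∈ t then t else t ++ [x]) acc := by
  induction ts generalizing acc with
  | nil => exact List.prefix_rfl
  | cons x ts ih =>
    simp only [List.foldl_cons]
    split
    · exact ih acc
    · exact List.IsPrefix.trans ⟨[x], rfl⟩ (ih (acc ++ [x]))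

-- every acronym is a tech keyword (B's flat casing rule relies on this)
lemma acronym_sub_tech (s : String) (h : pvAcronyms.contains s = true) :
    pvTechKeywords.contains s = true := by
  simp only [pvAcronyms, List.contains_eq_mem, List.mem_cons, List.not_mem_nil, or_false,
    decide_eq_true_eq] at h
  rcases h with rfl | rfl | rfl | rfl | rfl | rfl | rfl | rfl <;> decide

-- B's flat eligibility/casing rules produce exactly pvCandidate
lemma eligible_tag_eq_candidate (w : String) :
    (if (pvTechKeywords.contains (PySem.Str.lower w) ||
          (decide (PySem.Str.len w > 4) && !pvCommonWords.contains (PySem.Str.lower w))) = true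
     then some (if pvAcronyms.contains (PySem.Str.lower w) then w else pvCapitalize w)
     else none) = pvCandidate w := by
  by_cases ht : PySem.Str.lower w ∈ pvTechKeywords
  · simp [pvCandidate, ht]
  · have ha : PySem.Str.lower w ∉ pvAcronyms := by
      intro h
      exact ht (by simpa using acronym_sub_tech _ (by simpa using h))
    by_cases hc : PySem.Str.lower w ∈ pvCommonWords <;> by_cases hl : 4 < w.length <;>
      simp [pvCandidate, ht, ha, hc, hl]

-- pvPick on a full accumulator returns it unchanged
lemma pvPick_full (ws acc : List String) (h : acc.length = 3) : pvPick ws acc = acc := by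
  cases ws with
  | nil => rfl
  | cons w ws => simp [pvPick, h]

-- B's recursion equals dedup-then-take-3, for any accumulator shorter than 3
lemma pvPick_eq_dedup_take (ws : List String) (acc : List String) (h : acc.length < 3) :
    pvPick ws acc
      = ((ws.filterMap pvCandidate).foldl (fun t x => if x ∈ t then t else t ++ [x]) acc).take 3 := by
  induction ws generalizing acc with
  | nil => simpa [pvPick] using (List.take_of_length_le (by omega)).symm
  | cons w ws ih =>
    have hne : (acc.length == 3) = false := by simp; omega
    simp only [pvPick, hne, Bool.false_eq_true, if_false, List.filterMap_cons]
    rw [← eligible_tag_eq_candidate w]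
    set eb := (pvTechKeywords.contains (PySem.Str.lower w) ||
        (decide (PySem.Str.len w > 4) && !pvCommonWords.contains (PySem.Str.lower w))) with hedef
    set t := if pvAcronyms.contains (PySem.Str.lower w) then w else pvCapitalize w with hdef
    by_cases he : eb = true
    · simp only [he, if_true, List.foldl_cons, Bool.true_and]
      by_cases hmem : t ∈ acc
      · have h1 : (!acc.contains t) = false := by simp [hmem]
        rw [h1]
        simp only [if_pos hmem, if_neg (by simp : ¬ (false = true))]
        exact ih acc h
      · have h1 : (!acc.contains t) = true := by simp [hmem]
        rw [h1]
        simp only [if_neg hmem, if_true]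
        by_cases hlen : (acc ++ [t]).length = 3
        · rw [pvPick_full _ _ hlen]
          obtain ⟨s, hs⟩ := dedup_foldl_prefix (ws.filterMap pvCandidate) (acc ++ [t])
          rw [← hs, ← hlen, List.take_left]
        · have : (acc ++ [t]).length < 3 := by simp at hlen ⊢; omega
          exact ih (acc ++ [t]) this
    · have he' : eb = false := by simpa using he
      simp only [he', if_neg (by simp : ¬ (false = true)), Bool.false_and]
      exact ih acc h

-- single-char replace-by-space is a character map (inner worker, by fuel)
lemma replace_go_single (p : Char) (l acc : List Char) (fuel : Nat) (h : l.length ≤ fuel) :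
    PySem.Chars.replace.go [p] [' '] fuel l acc
      = acc.reverse ++ l.map (fun c => if c = p then ' ' else c) := by
  induction l generalizing acc fuel with
  | nil => cases fuel <;> simp [PySem.Chars.replace.go]
  | cons c t ih =>
    cases fuel with
    | zero => simp at h
    | succ fuel =>
      have hlen : t.length ≤ fuel := by simpa using h
      have hstep : PySem.Chars.replace.go [p] [' '] (fuel + 1) (c :: t) acc
          = if [p].isPrefixOf (c :: t) then
              PySem.Chars.replace.go [p] [' '] fuel (List.drop 1 (c :: t)) ([' '].reverse ++ acc)
            else PySem.Chars.replace.go [p] [' '] fuel t (c :: acc) := rfl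
      rw [hstep]
      by_cases hc : c = p
      · have hpre : [p].isPrefixOf (c :: t) = true := by simp [List.isPrefixOf, hc]
        rw [if_pos hpre]
        simp only [List.drop_one, List.tail_cons, List.reverse_singleton, List.singleton_append]
        rw [ih _ _ hlen]
        simp [hc]
      · have hpre : [p].isPrefixOf (c :: t) = false := by
          simp [List.isPrefixOf]
          exact fun hh => hc hh.symm
        rw [if_neg (by simp [hpre])]
        rw [ih _ _ hlen]
        simp [hc]

lemma replace_single (p : Char) (s : List Char) :
    PySem.Chars.replace s [p] [' '] = s.map (fun c => if c = p then ' ' else c) := by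
  have h0 : PySem.Chars.replace s [p] [' '] = PySem.Chars.replace.go [p] [' '] s.length s [] := rfl
  rw [h0]
  simpa using replace_go_single p s [] s.length le_rfl

-- the eight chained single-char replacements act as B's translation table
lemma chain_translate (c : Char) :
    (fun c => if c = '!' then ' ' else c) ((fun c => if c = '?' then ' ' else c)
      ((fun c => if c = '.' then ' ' else c) ((fun c => if c = ',' then ' ' else c)
        ((fun c => if c = ')' then ' ' else c) ((fun c => if c = '(' then ' ' else c)
          ((fun c => if c = '-' then ' ' else c) ((fun c => if c = ':' then ' ' else c) c)))))))
      = pvTranslate c := by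
  by_cases h1 : c = ':'
  · subst h1; decide
  by_cases h2 : c = '-'
  · subst h2; decide
  by_cases h3 : c = '('
  · subst h3; decide
  by_cases h4 : c = ')'
  · subst h4; decide
  by_cases h5 : c = ','
  · subst h5; decide
  by_cases h6 : c = '.'
  · subst h6; decide
  by_cases h7 : c = '?'
  · subst h7; decide
  by_cases h8 : c = '!'
  · subst h8; decide
  simp [pvTranslate, h1, h2, h3, h4, h5, h6, h7, h8]

-- A's cleaned title has exactly B's translated character list
lemma clean_toList (title : String) :
    (PySem.Str.replace (PySem.Str.replace (PySem.Str.replace (PySem.Str.replace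
        (PySem.Str.replace (PySem.Str.replace (PySem.Str.replace (PySem.Str.replace
          title ":" " ") "-" " ") "(" " ") ")" " ") "," " ") "." " ") "?" " ") "!" " ").toList
      = title.toList.map pvTranslate := by
  simp only [PySem.Str.toList_replace]
  rw [show (":" : String).toList = [':'] from by decide,
    show ("-" : String).toList = ['-'] from by decide,
    show ("(" : String).toList = ['('] from by decide,
    show (")" : String).toList = [')'] from by decide,
    show ("," : String).toList = [','] from by decide,
    show ("." : String).toList = ['.'] from by decide,
    show ("?" : String).toList = ['?'] from by decide,
    show ("!" : String).toList = ['!'] from by decide,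
    show (" " : String).toList = [' '] from by decide]
  simp only [replace_single, List.map_map]
  refine List.map_congr_left (fun c _ => ?_)
  have h := chain_translate c
  rw [Function.comp_apply, Function.comp_apply, Function.comp_apply, Function.comp_apply,
    Function.comp_apply, Function.comp_apply, Function.comp_apply]
  exact h

-- both ports compute the same word list in the extraction branch
lemma words_eq (title : String) :
    PySem.Str.split₀ (PySem.Str.replace (PySem.Str.replace (PySem.Str.replace (PySem.Str.replace
        (PySem.Str.replace (PySem.Str.replace (PySem.Str.replace (PySem.Str.replace
          title ":" " ") "-" " ") "(" " ") ")" " ") "," " ") "." " ") "?" " ") "!" " ")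
      = PySem.Str.split₀ (String.ofList (title.toList.map pvTranslate)) := by
  show List.map String.ofList _ = List.map String.ofList _
  rw [clean_toList]
  simp

-- the shared core: A's three phases equal B's recursion, on any word list
lemma phases_eq_pick (ws : List String) :
    PySem.List.slice
      ((ws.foldl (fun e w =>
          let w_lower := PySem.Str.lower w
          if pvTechKeywords.contains w_lower then
            e ++ [if pvAcronyms.contains w_lower then w else pvCapitalize w]
          else if ¬ pvCommonWords.contains w_lower ∧ PySem.Str.len w > 4 then
            e ++ [pvCapitalize w]
          else e) []).foldl (fun t x => if x ∈ t then t else t ++ [x]) [])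
      none (some 3)
      = pvPick ws [] := by
  rw [stepA_eq_candidate, foldl_opt_append, List.nil_append,
    pvPick_eq_dedup_take ws [] (by simp)]
  simp [PySem.List.slice_to]

-- ===== VERDICT (by name: the statement is the Claim_ definition above) =====
theorem extract_tags_logic_spec : Claim_equal_extract_tags_logic := by
  intro title tags _
  unfold Spec_extract_tags_logic extract_tags_logic extract_tags_logic_alt
  cases tags with
  | none =>
    simp only [words_eq, phases_eq_pick]
    simp
  | some t =>
    cases t with
    | nil =>
      simp only [words_eq, phases_eq_pick]
      simp
    | cons a t => simp
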